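-- pv_equiv track=rewrite | github.com/Victoriad1996/SemesterProject | SimpleFairhall/functions.py | some_indices
-- ===== SOURCE A (Python) =====
-- def some_indices(neuron_idx : int) -> list:
--     """
--     Creates a list of indices.
--
--     :param neuron_idx: An index
--     :type neuron_idx: int
--     :return: List of indices
--     :rtype: list of int
--     """
--     neuron_idx2 = neuron_idx - 1
--     neuron_idx3 = 16
--     new_idx = 0
--     rows = 20
--     cols = 30
--
--     for j in range(rows * cols):
--         if (j//rows == 10 and j % rows == 5):
--             new_idx = j
--
--     my_indices = [neuron_idx, neuron_idx2, neuron_idx3, new_idx]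
--     return my_indices
-- ===== SOURCE B (Python) =====
-- def some_indices(neuron_idx: int) -> list:
--     # Closed form: the unique j in range(600) with j//20 == 10 and j % 20 == 5 is 10*20 + 5 = 205.
--     return [neuron_idx, neuron_idx - 1, 16, 205]
-- ===== Notes on version B (the rewrite author's own statement) =====
-- stated objective: simpler
-- what changed: Replaced the fixed-bound search loop with the single constant it always finds, returning the four derived values directly as a literal list.
import Mathlib
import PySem

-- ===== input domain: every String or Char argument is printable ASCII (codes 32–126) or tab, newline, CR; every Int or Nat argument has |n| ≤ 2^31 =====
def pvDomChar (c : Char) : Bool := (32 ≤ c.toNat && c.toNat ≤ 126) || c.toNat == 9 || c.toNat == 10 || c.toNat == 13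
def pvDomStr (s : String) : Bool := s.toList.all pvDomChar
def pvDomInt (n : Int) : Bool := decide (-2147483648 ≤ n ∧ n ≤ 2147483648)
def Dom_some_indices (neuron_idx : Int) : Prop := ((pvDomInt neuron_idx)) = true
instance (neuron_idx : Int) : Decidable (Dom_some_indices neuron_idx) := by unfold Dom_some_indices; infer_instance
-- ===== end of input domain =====

-- B replaces A's fixed-bound search loop with the constant it always finds, returning the four derived values directly (objective: simpler).


-- ===== PORT A =====
-- literal port of A: the loop over range(20*30) updating new_idx
def some_indices (neuron_idx : Int) : List Int :=
  let neuron_idx2 := neuron_idx - 1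
  let neuron_idx3 : Int := 16
  let new_idx : Int := 0
  let rows : Int := 20
  let cols : Int := 30
  let new_idx := (PySem.List.pyRange 0 (rows * cols) 1).foldl
    (fun acc j => if PySem.Int.floordiv j rows = 10 ∧ PySem.Int.mod j rows = 5 then j else acc) new_idx
  [neuron_idx, neuron_idx2, neuron_idx3, new_idx]

-- ===== PORT B =====
-- B: closed form, no loop
def some_indices_alt (neuron_idx : Int) : List Int :=
  [neuron_idx, neuron_idx - 1, 16, 205]

-- ===== PRECONDITION & SPEC =====
def Spec_some_indices (neuron_idx : Int) (out : List Int) : Prop := out = some_indices_alt neuron_idx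
instance (neuron_idx : Int) (out : List Int) : Decidable (Spec_some_indices neuron_idx out) := by unfold Spec_some_indices; infer_instance

-- ===== CLAIM (what is proved, stated in full; the proofs are below) =====
def Claim_equal_some_indices : Prop := ∀ (neuron_idx : Int), Dom_some_indices neuron_idx → Spec_some_indices neuron_idx (some_indices neuron_idx)

-- ===== LEMMAS AND PROOFS =====

-- ===== VERDICT (by name: the statement is the Claim_ definition above) =====
set_option maxRecDepth 4000 in
-- the loop's result is a closed Int computation, independent of the input
theorem some_indices_spec : Claim_equal_some_indices := by
  intro n _
  show some_indices n = some_indices_alt n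
  have h : ((PySem.List.pyRange 0 600 1).foldl
      (fun acc j => if j / 20 = 10 ∧ j % 20 = 5 then j else acc) (0 : Int)) = 205 := by
    decide
  simp [some_indices, some_indices_alt]
  exact h
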